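-- pv_equiv track=rewrite | github.com/alphajin1/interview | programmers/CodingTestKit/42840.py | solution
-- ===== SOURCE A (Python) =====
-- def solution(answers):
--     answer = []
--
--     pattern1 = [1, 2, 3, 4, 5]
--     pattern2 = [2, 1, 2, 3, 2, 4, 2, 5]
--     pattern3 = [3, 3, 1, 1, 2, 2, 4, 4, 5, 5]
--
--     correct1 = 0
--     correct2 = 0
--     correct3 = 0
--
--     i = 0
--     for ans in answers:
--         if ans == pattern1[i % len(pattern1)]:
--             correct1 += 1
--         if ans == pattern2[i % len(pattern2)]:
--             correct2 += 1
--         if ans == pattern3[i % len(pattern3)]: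
--             correct3 += 1
--
--         i += 1
--
--     max_correct = max(correct1, max(correct2, correct3))
--     if max_correct == correct1:
--         answer.append(1)
--     if max_correct == correct2:
--         answer.append(2)
--     if max_correct == correct3:
--         answer.append(3)
--
--     return answer
-- ===== SOURCE B (Python) =====
-- def solution(answers):
--     PERIOD = 40  # lcm of the three pattern lengths 5, 8, 10
--     hist = {}
--     for i, a in enumerate(answers):
--         key = (i % PERIOD, a)
--         hist[key] = hist.get(key, 0) + 1
--     patterns = [
--         [1, 2, 3, 4, 5],
--         [2, 1, 2, 3, 2, 4, 2, 5],
--         [3, 3, 1, 1, 2, 2, 4, 4, 5, 5],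
--     ]
--     scores = [sum(hist.get((j, p[j % len(p)]), 0) for j in range(PERIOD))
--               for p in patterns]
--     best = max(scores)
--     return [k + 1 for k, s in enumerate(scores) if s == best]
-- ===== Notes on version B (the rewrite author's own statement) =====
-- stated objective: alternative
-- what changed: B never compares answers to the patterns while scanning: it builds a histogram keyed by (position mod 40, answer) in one pass (40 = lcm of the pattern lengths), then computes each pattern's score from the 40-entry period of that histogram, so scoring never touches the answers list; A keeps three scalar counters updated inside a single loop over answers.
import Mathlib
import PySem

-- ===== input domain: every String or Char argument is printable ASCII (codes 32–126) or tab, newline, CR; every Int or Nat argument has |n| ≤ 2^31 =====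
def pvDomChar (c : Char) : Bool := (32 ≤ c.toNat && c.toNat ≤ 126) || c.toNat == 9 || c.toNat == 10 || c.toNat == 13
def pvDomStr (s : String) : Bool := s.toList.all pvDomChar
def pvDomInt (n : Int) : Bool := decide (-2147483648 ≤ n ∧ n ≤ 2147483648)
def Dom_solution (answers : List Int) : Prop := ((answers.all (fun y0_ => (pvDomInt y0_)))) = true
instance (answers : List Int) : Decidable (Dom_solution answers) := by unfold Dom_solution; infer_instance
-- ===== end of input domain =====

-- B scores the three patterns from a (position mod 40, answer) histogram built in one pass, instead of A's three counters updated while scanning; same O(n) cost.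

-- ===== PORT A =====
-- one loop over answers maintaining three counters and the index i
def solution (answers : List Int) : List Int :=
  let pattern1 : List Int := [1, 2, 3, 4, 5]
  let pattern2 : List Int := [2, 1, 2, 3, 2, 4, 2, 5]
  let pattern3 : List Int := [3, 3, 1, 1, 2, 2, 4, 4, 5, 5]
  let st := answers.foldl
    (fun (st : Int × Int × Int × Int) ans =>
      match st with
      | (c1, c2, c3, i) =>
        -- pattern[i % len(pattern)]: index always in range, so the pyGetD default 0 is never used
        ((if ans = PySem.List.pyGetD pattern1 (PySem.Int.mod i 5) 0 then c1 + 1 else c1),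
         (if ans = PySem.List.pyGetD pattern2 (PySem.Int.mod i 8) 0 then c2 + 1 else c2),
         (if ans = PySem.List.pyGetD pattern3 (PySem.Int.mod i 10) 0 then c3 + 1 else c3),
         i + 1))
    ((0, 0, 0, 0) : Int × Int × Int × Int)
  match st with
  | (c1, c2, c3, _) =>
    let maxCorrect := max c1 (max c2 c3)
    ((if maxCorrect = c1 then [(1 : Int)] else []) ++
     (if maxCorrect = c2 then [(2 : Int)] else []) ++
     (if maxCorrect = c3 then [(3 : Int)] else []))

-- ===== PORT B =====
-- hist[key] = hist.get(key, 0) + 1 over enumerate(answers), key = (i % 40, a)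
def altHist (answers : List Int) : PySem.Dict (Int × Int) Int :=
  ((PySem.List.enumerate answers 0).map (fun ia => (PySem.Int.mod ia.1 40, ia.2))).foldl
    (fun d k => d.insert k (d.getD k 0 + 1)) PySem.Dict.empty

-- sum(hist.get((j, p[j % len(p)]), 0) for j in range(PERIOD))
def altScore (hist : PySem.Dict (Int × Int) Int) (p : List Int) : Int :=
  ((PySem.List.pyRange 0 40 1).map
    (fun j => hist.getD (j, PySem.List.pyGetD p (PySem.Int.mod j (p.length : Int)) 0) 0)).sum

def solution_alt (answers : List Int) : List Int :=
  let hist := altHist answers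
  let patterns : List (List Int) :=
    [[1, 2, 3, 4, 5], [2, 1, 2, 3, 2, 4, 2, 5], [3, 3, 1, 1, 2, 2, 4, 4, 5, 5]]
  let scores := patterns.map (altScore hist)
  let best := (PySem.List.max? scores (fun y => y)).getD 0   -- max(scores); scores nonempty, default unused
  (PySem.List.enumerate scores 0).filterMap
    (fun ks => if ks.2 = best then some (ks.1 + 1) else none)

-- ===== PRECONDITION & SPEC =====
def Spec_solution (answers : List Int) (out : List Int) : Prop := out = solution_alt answers
instance (answers : List Int) (out : List Int) : Decidable (Spec_solution answers out) := by unfold Spec_solution; infer_instance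

-- ===== CLAIM (what is proved, stated in full; the proofs are below) =====
def Claim_equal_solution : Prop := ∀ (answers : List Int), Dom_solution answers → Spec_solution answers (solution answers)

-- ===== LEMMAS AND PROOFS =====

-- number of positions (counted from start index i) where the answer matches pattern p
def cnt (p : List Int) (i : Int) : List Int → Int
  | [] => 0
  | a :: t => (if a = PySem.List.pyGetD p (PySem.Int.mod i (p.length : Int)) 0 then 1 else 0) + cnt p (i + 1) t

lemma loopA (xs : List Int) :
    ∀ (c1 c2 c3 i : Int),
      xs.foldl
        (fun (st : Int × Int × Int × Int) ans =>
          match st with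
          | (c1, c2, c3, i) =>
            ((if ans = PySem.List.pyGetD ([1, 2, 3, 4, 5] : List Int) (PySem.Int.mod i 5) 0 then c1 + 1 else c1),
             (if ans = PySem.List.pyGetD ([2, 1, 2, 3, 2, 4, 2, 5] : List Int) (PySem.Int.mod i 8) 0 then c2 + 1 else c2),
             (if ans = PySem.List.pyGetD ([3, 3, 1, 1, 2, 2, 4, 4, 5, 5] : List Int) (PySem.Int.mod i 10) 0 then c3 + 1 else c3),
             i + 1)) (c1, c2, c3, i)
      = (c1 + cnt [1, 2, 3, 4, 5] i xs,
         c2 + cnt [2, 1, 2, 3, 2, 4, 2, 5] i xs,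
         c3 + cnt [3, 3, 1, 1, 2, 2, 4, 4, 5, 5] i xs,
         i + xs.length) := by
  induction xs with
  | nil => intro c1 c2 c3 i; simp [cnt]
  | cons a t ih =>
    intro c1 c2 c3 i
    simp only [List.foldl_cons, ih, cnt]
    refine Prod.ext ?_ (Prod.ext ?_ (Prod.ext ?_ ?_)) <;>
      · simp
        try split
        all_goals omega

-- one indicator survives in a sum over a Nodup list containing k.1
lemma sum_ind (pv : Int → Int) (k : Int × Int) :
    ∀ (R : List Int), R.Nodup → k.1 ∈ R →
      (R.map (fun j => if ((j, pv j) : Int × Int) = k then (1 : Int) else 0)).sum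
        = if k.2 = pv k.1 then 1 else 0 := by
  intro R
  induction R with
  | nil => simp
  | cons r R ih =>
    intro hnd hm
    simp only [List.map_cons, List.sum_cons]
    rcases List.mem_cons.mp hm with h | h
    · subst h
      have hz : (R.map (fun j => if ((j, pv j) : Int × Int) = k then (1 : Int) else 0)).sum = 0 := by
        apply List.sum_eq_zero
        intro x hx
        rcases List.mem_map.mp hx with ⟨j, hj, rfl⟩
        have : j ≠ k.1 := fun h => ((List.nodup_cons.mp hnd).1 (h ▸ hj))
        simp [Prod.ext_iff, this]
      rw [hz]
      rcases k with ⟨k1, k2⟩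
      simp [Prod.ext_iff, eq_comm]
    · have hr : r ≠ k.1 := by
        rintro rfl; exact (List.nodup_cons.mp hnd).1 h
      rw [ih (List.nodup_cons.mp hnd).2 h]
      simp [Prod.ext_iff, hr]

-- summing the histogram counts over one period = counting matching keys directly
lemma sum_count (pv : Int → Int) (ks : List (Int × Int))
    (h : ∀ k ∈ ks, 0 ≤ k.1 ∧ k.1 < 40) :
    ((PySem.List.pyRange 0 40 1).map (fun j => (ks.count (j, pv j) : Int))).sum
      = ((ks.countP (fun k => k.2 == pv k.1) : Nat) : Int) := by
  induction ks with
  | nil => simp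
  | cons k ks ih =>
    have hk := h k (List.mem_cons_self ..)
    have hmem : k.1 ∈ PySem.List.pyRange 0 40 1 := by
      rw [PySem.List.mem_pyRange_one]; omega
    have ihh := ih (fun x hx => h x (List.mem_cons_of_mem _ hx))
    simp only [List.count_cons, List.countP_cons]
    push_cast
    rw [PySem.List.sum_map_add_int, ihh]
    have h2 : ((PySem.List.pyRange 0 40 1).map
        (fun j => if ((j, pv j) : Int × Int) = k then (1 : Int) else 0)).sum
        = if k.2 = pv k.1 then 1 else 0 :=
      sum_ind pv k _ (PySem.List.nodup_pyRange_one 0 40) hmem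
    simp only [beq_iff_eq,
      show ∀ j : Int, (k = (j, pv j)) = (((j, pv j) : Int × Int) = k) from
        fun j => propext eq_comm]
    rw [h2]

-- countP over the histogram keys of answers (enumerated from i) = cnt p i answers
lemma countP_enum (p : List Int) (hp : (0:Int) < p.length) (hd : (p.length : Int) ∣ 40) (xs : List Int) :
    ∀ i : Int,
      ((((PySem.List.enumerate xs i).map (fun ia => (PySem.Int.mod ia.1 40, ia.2))).countP
        (fun k => k.2 == PySem.List.pyGetD p (PySem.Int.mod k.1 (p.length : Int)) 0) : Nat) : Int)
      = cnt p i xs := by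
  induction xs with
  | nil => intro i; simp [PySem.List.enumerate_nil, cnt]
  | cons a t ih =>
    intro i
    have hmm : PySem.Int.mod (PySem.Int.mod i 40) (p.length : Int) = PySem.Int.mod i (p.length : Int) := by
      rw [PySem.Int.mod_eq_emod_of_pos hp, PySem.Int.mod_eq_emod_of_pos (by norm_num),
        PySem.Int.mod_eq_emod_of_pos hp]
      exact Int.emod_emod_of_dvd i hd
    simp only [PySem.List.enumerate_cons, List.map_cons, List.countP_cons, cnt, ← ih (i + 1), hmm]
    by_cases hc : a = PySem.List.pyGetD p (PySem.Int.mod i (p.length : Int)) 0 <;>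
      simp [hc] <;> try omega

-- the whole B score equals cnt
lemma altScore_eq (p : List Int) (hp : (0:Int) < p.length) (hd : (p.length : Int) ∣ 40) (xs : List Int) :
    altScore (altHist xs) p = cnt p 0 xs := by
  unfold altScore altHist
  rw [PySem.Dict.foldl_insert_getD_add_one_eq_counter]
  have hkeys : ∀ k ∈ (PySem.List.enumerate xs 0).map (fun ia => (PySem.Int.mod ia.1 40, ia.2)),
      0 ≤ k.1 ∧ k.1 < 40 := by
    intro k hk
    rcases List.mem_map.mp hk with ⟨ia, _, rfl⟩
    exact ⟨PySem.Int.mod_nonneg _ (by norm_num), PySem.Int.mod_lt _ (by norm_num)⟩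
  calc ((PySem.List.pyRange 0 40 1).map
          (fun j => (PySem.Dict.counter _).getD (j, PySem.List.pyGetD p (PySem.Int.mod j (p.length:Int)) 0) 0)).sum
      = ((PySem.List.pyRange 0 40 1).map
          (fun j => ((((PySem.List.enumerate xs 0).map (fun ia => (PySem.Int.mod ia.1 40, ia.2))).count
            (j, PySem.List.pyGetD p (PySem.Int.mod j (p.length:Int)) 0) : Nat) : Int))).sum := by
        simp [PySem.Dict.getD_counter]
    _ = cnt p 0 xs := by
        rw [sum_count _ _ hkeys, countP_enum p hp hd xs 0]

-- ===== VERDICT (by name: the statement is the Claim_ definition above) =====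
theorem solution_spec : Claim_equal_solution := by
  intro answers _
  show solution answers = solution_alt answers
  unfold solution solution_alt
  simp only [loopA answers 0 0 0 0, List.map,
    altScore_eq [1,2,3,4,5] (by norm_num) (by norm_num),
    altScore_eq [2,1,2,3,2,4,2,5] (by norm_num) (by norm_num),
    altScore_eq [3,3,1,1,2,2,4,4,5,5] (by norm_num) (by norm_num),
    zero_add, PySem.List.max?_id_cons, List.foldl, Option.getD_some,
    PySem.List.enumerate_cons, PySem.List.enumerate_nil, List.filterMap_cons,
    List.filterMap_nil]
  set s1 := cnt [1, 2, 3, 4, 5] 0 answers with hs1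
  set s2 := cnt [2, 1, 2, 3, 2, 4, 2, 5] 0 answers with hs2
  set s3 := cnt [3, 3, 1, 1, 2, 2, 4, 4, 5, 5] 0 answers with hs3
  rw [max_assoc]
  set M := max s1 (max s2 s3) with hMdef
  by_cases h1 : s1 = M <;> by_cases h2 : s2 = M <;> by_cases h3 : s3 = M <;>
    simp [show (M = s1) = (s1 = M) from propext eq_comm,
      show (M = s2) = (s2 = M) from propext eq_comm,
      show (M = s3) = (s3 = M) from propext eq_comm, h1, h2, h3]
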